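-- pv_equiv track=rewrite | github.com/alexandrabradan/BachelorDegreeThesis | code/notebook/LastFmGithub/Hit-Savvy/BuilModel_1.py | check_if_at_is_continous
-- ===== SOURCE A (Python) =====
-- def check_if_at_is_continous(at, period_of_continuity):
--     continous_week = 0
--     for i in range(0, len(at)):
--         if int(at[i]) > 0:
--             continous_week += 1
--         else:
--             continous_week = 0
--
--         if continous_week == period_of_continuity:
--             return True
--
--     if continous_week >= period_of_continuity:
--         return True
--     else:
--         return False
-- ===== SOURCE B (Python) =====
-- def check_if_at_is_continous(at, period_of_continuity):
--     vals = [int(x) > 0 for x in at]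
--     p = period_of_continuity
--     if p <= 0:
--         return True
--     for i in range(len(vals) - p + 1):
--         if all(vals[i:i + p]):
--             return True
--     return False
-- ===== Notes on version B (the rewrite author's own statement) =====
-- stated objective: alternative
-- what changed: Replaced A's single-pass running-counter scan with early return by a two-phase brute-force window search: first map each element to a positivity flag, then test every window of length period via slicing (trivially True for period <= 0).
import Mathlib
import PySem

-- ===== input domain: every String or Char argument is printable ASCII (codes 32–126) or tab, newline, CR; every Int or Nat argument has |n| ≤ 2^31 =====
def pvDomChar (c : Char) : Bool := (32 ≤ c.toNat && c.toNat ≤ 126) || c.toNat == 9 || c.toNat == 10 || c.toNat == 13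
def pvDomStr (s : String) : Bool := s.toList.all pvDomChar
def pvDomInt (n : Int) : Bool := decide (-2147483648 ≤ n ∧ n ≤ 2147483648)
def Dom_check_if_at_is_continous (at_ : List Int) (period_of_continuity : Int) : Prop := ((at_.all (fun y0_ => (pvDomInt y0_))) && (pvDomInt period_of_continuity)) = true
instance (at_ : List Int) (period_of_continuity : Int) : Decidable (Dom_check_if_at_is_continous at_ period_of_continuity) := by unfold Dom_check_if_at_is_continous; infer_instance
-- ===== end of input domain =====

-- B replaces A's running-counter scan with early return by a two-phase brute-force
-- window search: map to positivity flags, then test every slice of length period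
-- (trivially true for period ≤ 0); alternative structure, O(n·p) instead of O(n).


-- ===== PORT A =====
-- the for-loop over range(0, len(at)) with state continous_week and the early return,
-- followed by the trailing >= check on loop exit
def pvLoopA : List Int → Int → Int → Bool
  | [], continous_week, period => decide (continous_week ≥ period)
  | x :: rest, continous_week, period =>
    let cw := if 0 < x then continous_week + 1 else 0
    if cw = period then true else pvLoopA rest cw period

def check_if_at_is_continous (at_ : List Int) (period_of_continuity : Int) : Bool :=
  pvLoopA at_ 0 period_of_continuity

-- ===== PORT B =====
-- Source B: vals = [int(x) > 0 for x in at]; if p <= 0: True; else the early-return loop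
-- over range(len(vals) - p + 1) testing all(vals[i:i+p]), as .any over the range
def check_if_at_is_continous_alt (at_ : List Int) (period_of_continuity : Int) : Bool :=
  let vals := at_.map (fun x => decide (0 < x))
  if period_of_continuity ≤ 0 then true
  else
    (PySem.List.pyRange 0 ((vals.length : Int) - period_of_continuity + 1) 1).any
      (fun i => (PySem.List.slice vals (some i) (some (i + period_of_continuity))).all id)

-- ===== PRECONDITION & SPEC =====
def Spec_check_if_at_is_continous (at_ : List Int) (period_of_continuity : Int) (out : Bool) : Prop := out = check_if_at_is_continous_alt at_ period_of_continuity
instance (at_ : List Int) (period_of_continuity : Int) (out : Bool) : Decidable (Spec_check_if_at_is_continous at_ period_of_continuity out) := by unfold Spec_check_if_at_is_continous; infer_instance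

-- ===== CLAIM (what is proved, stated in full; the proofs are below) =====
def Claim_equal_check_if_at_is_continous : Prop := ∀ (at_ : List Int) (period_of_continuity : Int), Dom_check_if_at_is_continous at_ period_of_continuity → Spec_check_if_at_is_continous at_ period_of_continuity (check_if_at_is_continous at_ period_of_continuity)

-- ===== LEMMAS AND PROOFS =====

-- maximum over all future counter values (including the final one), starting from counter c
def pvM : List Int → Int → Int
  | [], c => c
  | x :: rest, c =>
    let c' := if 0 < x then c + 1 else 0
    max c' (pvM rest c')

-- "xs has a window of k consecutive positive elements"
def pvRun (xs : List Int) (k : Nat) : Prop :=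
  ∃ j : Nat, j + k ≤ xs.length ∧ ∀ y ∈ (xs.drop j).take k, 0 < y

theorem pvM_nonneg : ∀ (xs : List Int) (c : Int), 0 ≤ c → 0 ≤ pvM xs c := by
  intro xs
  induction xs with
  | nil => intro c hc; simpa [pvM] using hc
  | cons x rest ih =>
    intro c hc
    simp only [pvM]
    split_ifs with h
    · have := ih (c + 1) (by omega); omega
    · have := ih 0 (by omega); omega

theorem pvM_mono : ∀ (xs : List Int) (c d : Int), c ≤ d → pvM xs c ≤ pvM xs d := by
  intro xs
  induction xs with
  | nil => intro c d h; simpa [pvM] using h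
  | cons x rest ih =>
    intro c d h
    simp only [pvM]
    split_ifs with hx
    · have := ih (c + 1) (d + 1) (by omega); omega
    · have := ih 0 0 le_rfl; omega

theorem pvLoopA_nonpos : ∀ (xs : List Int) (c p : Int), 0 ≤ c → p ≤ 0 →
    pvLoopA xs c p = true := by
  intro xs
  induction xs with
  | nil => intro c p hc hp; simp [pvLoopA]; omega
  | cons x rest ih =>
    intro c p hc hp
    by_cases hx : 0 < x
    · simp only [pvLoopA, if_pos hx]
      by_cases he : c + 1 = p
      · simp [he]
      · simp only [if_neg he]
        exact ih (c + 1) p (by omega) hp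
    · simp only [pvLoopA, if_neg hx]
      by_cases he : (0 : Int) = p
      · simp [he]
      · simp only [if_neg he]
        exact ih 0 p (by omega) hp

theorem pvLoopA_eq_M : ∀ (xs : List Int) (c p : Int), 0 ≤ c → c < p →
    pvLoopA xs c p = decide (pvM xs c ≥ p) := by
  intro xs
  induction xs with
  | nil => intro c p hc hcp; simp [pvLoopA, pvM]
  | cons x rest ih =>
    intro c p hc hcp
    simp only [pvLoopA, pvM]
    by_cases hx : 0 < x
    · simp only [if_pos hx]
      by_cases he : c + 1 = p
      · rw [if_pos he]
        have h1 : 0 ≤ pvM rest (c + 1) := pvM_nonneg rest (c + 1) (by omega)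
        have : max (c + 1) (pvM rest (c + 1)) ≥ p := by omega
        simp [this]
      · rw [if_neg he]
        rw [ih (c + 1) p (by omega) (by omega)]
        have h1 : 0 ≤ pvM rest (c + 1) := pvM_nonneg rest (c + 1) (by omega)
        simp only [ge_iff_le, decide_eq_decide]
        omega
    · simp only [if_neg hx]
      by_cases he : (0 : Int) = p
      · omega
      · rw [if_neg he]
        rw [ih 0 p (by omega) (by omega)]
        simp only [ge_iff_le, decide_eq_decide]
        omega

-- an all-positive prefix of length k pushes the max counter to at least c + k
theorem pvM_of_pref_pos : ∀ (xs : List Int) (k : Nat) (c : Int), 1 ≤ k → k ≤ xs.length →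
    (∀ y ∈ xs.take k, 0 < y) → c + k ≤ pvM xs c := by
  intro xs
  induction xs with
  | nil => intro k c hk hlen _; simp at hlen; omega
  | cons x rest ih =>
    intro k c hk hlen hall
    obtain ⟨k', rfl⟩ : ∃ k', k = k' + 1 := ⟨k - 1, by omega⟩
    have hx : 0 < x := hall x (by simp [List.take_succ_cons])
    simp only [pvM, if_pos hx]
    by_cases hk' : k' = 0
    · subst hk'; push_cast; omega
    · have hrest : k' ≤ rest.length := by simp at hlen; omega
      have hallr : ∀ y ∈ rest.take k', 0 < y := by
        intro y hy
        refine hall y ?_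
        rw [List.take_succ_cons]
        exact List.mem_cons_of_mem _ hy
      have := ih k' (c + 1) (by omega) hrest hallr
      push_cast at this ⊢
      omega

theorem pvM_drop_le : ∀ (xs : List Int) (j : Nat), pvM (xs.drop j) 0 ≤ pvM xs 0 := by
  intro xs
  induction xs with
  | nil => intro j; simp
  | cons x rest ih =>
    intro j
    match j with
    | 0 => exact le_rfl
    | j' + 1 =>
      have h1 : (x :: rest).drop (j' + 1) = rest.drop j' := rfl
      rw [h1]
      refine le_trans (ih j') ?_
      simp only [pvM]
      split_ifs with hx
      · have := pvM_mono rest 0 (0 + 1) (by omega); omega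
      · omega

theorem run_to_M (xs : List Int) (k : Nat) (hk : 1 ≤ k) (h : pvRun xs k) :
    (k : Int) ≤ pvM xs 0 := by
  obtain ⟨j, hlen, hall⟩ := h
  have hklen : k ≤ (xs.drop j).length := by simp [List.length_drop]; omega
  have := pvM_of_pref_pos (xs.drop j) k 0 hk hklen hall
  have := pvM_drop_le xs j
  omega

-- split off the leading positive run: pvM (x::rest) 0 for positive x
theorem pvM_posrun : ∀ (rest : List Int) (c : Int), 0 ≤ c →
    max (c + 1) (pvM rest (c + 1)) =
      max (c + 1 + ((rest.takeWhile (fun y => decide (0 < y))).length : Int))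
          (pvM (rest.dropWhile (fun y => decide (0 < y))) 0) := by
  intro rest
  induction rest with
  | nil => intro c hc; simp [pvM]; omega
  | cons y ys ih =>
    intro c hc
    by_cases hy : 0 < y
    · have ht : (y :: ys).takeWhile (fun z => decide (0 < z))
          = y :: ys.takeWhile (fun z => decide (0 < z)) := by simp [hy]
      have hd : (y :: ys).dropWhile (fun z => decide (0 < z))
          = ys.dropWhile (fun z => decide (0 < z)) := by simp [hy]
      rw [ht, hd]
      have step : pvM (y :: ys) (c + 1) = max (c + 1 + 1) (pvM ys (c + 1 + 1)) := by
        simp [pvM, hy]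
      rw [step, ih (c + 1) (by omega)]
      simp only [List.length_cons]
      push_cast
      omega
    · have ht : (y :: ys).takeWhile (fun z => decide (0 < z)) = [] := by simp [hy]
      have hd : (y :: ys).dropWhile (fun z => decide (0 < z)) = y :: ys := by simp [hy]
      rw [ht, hd]
      have step : pvM (y :: ys) (c + 1) = max 0 (pvM ys 0) := by simp [pvM, hy]
      have step0 : pvM (y :: ys) 0 = max 0 (pvM ys 0) := by simp [pvM, hy]
      rw [step, step0]
      simp only [List.length_nil, Int.natCast_zero, add_zero]

theorem M_to_run : ∀ (n : Nat) (xs : List Int), xs.length ≤ n → ∀ (k : Nat), 1 ≤ k →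
    (k : Int) ≤ pvM xs 0 → pvRun xs k := by
  intro n
  induction n with
  | zero =>
    intro xs hlen k hk hM
    have : xs = [] := List.length_eq_zero_iff.mp (Nat.le_zero.mp hlen)
    subst this
    simp [pvM] at hM
    omega
  | succ n ih =>
    intro xs hlen k hk hM
    match xs with
    | [] => simp [pvM] at hM; omega
    | x :: rest =>
      by_cases hx : 0 < x
      · have hM1 : pvM (x :: rest) 0 = max (0 + 1) (pvM rest (0 + 1)) := by
          simp [pvM, hx]
        rw [hM1, pvM_posrun rest 0 le_rfl] at hM
        set q : Int → Bool := fun y => decide (0 < y) with hq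
        set tw := (rest.takeWhile q).length with htw
        have htwle : tw ≤ rest.length := (List.takeWhile_prefix (l := rest) (p := q)).length_le
        by_cases hcase : (k : Int) ≤ 0 + 1 + (tw : Int)
        · -- window at position 0
          obtain ⟨k', rfl⟩ : ∃ k', k = k' + 1 := ⟨k - 1, by omega⟩
          refine ⟨0, ?_, ?_⟩
          · simp only [List.length_cons]
            omega
          · intro y hy
            simp only [List.drop_zero, List.take_succ_cons] at hy
            rcases List.mem_cons.mp hy with h | h
            · subst h; exact hx
            · have hpref : rest.take k' = (rest.takeWhile q).take k' := by
                obtain ⟨t, hts⟩ := (List.takeWhile_prefix (l := rest) (p := q))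
                conv_lhs => rw [← hts]
                rw [List.take_append_of_le_length (by omega)]
              rw [hpref] at h
              have hmemtw : y ∈ rest.takeWhile q := List.mem_of_mem_take h
              have := List.mem_takeWhile_imp hmemtw
              simpa [hq] using this
        · -- window strictly inside the dropped part
          have hM2 : (k : Int) ≤ pvM (rest.dropWhile q) 0 := by omega
          have hdl : (rest.dropWhile q).length ≤ n := by
            have := List.length_dropWhile_le q rest
            simp only [List.length_cons] at hlen
            omega
          obtain ⟨j, hjlen, hall⟩ := ih (rest.dropWhile q) hdl k hk hM2
          have hsplit : rest.takeWhile q ++ rest.dropWhile q = rest :=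
            List.takeWhile_append_dropWhile
          have hdrop : rest.drop tw = rest.dropWhile q := by
            have h := List.drop_left' (l₁ := rest.takeWhile q) (l₂ := rest.dropWhile q) htw.symm
            rwa [hsplit] at h
          have hlr : rest.length = tw + (rest.dropWhile q).length := by
            have h := congrArg List.length hsplit
            rw [List.length_append] at h
            omega
          refine ⟨1 + tw + j, ?_, ?_⟩
          · simp only [List.length_cons]
            omega
          · intro y hy
            apply hall y
            have heq : (x :: rest).drop (1 + tw + j) = (rest.dropWhile q).drop j := by
              have h1 : (x :: rest).drop (1 + tw + j) = rest.drop (tw + j) := by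
                have h2 : 1 + tw + j = (tw + j) + 1 := by omega
                rw [h2]
                rfl
              rw [h1, ← List.drop_drop, hdrop]
            rwa [heq] at hy
      · have hM1 : pvM (x :: rest) 0 = max 0 (pvM rest 0) := by simp [pvM, hx]
        have hnn : 0 ≤ pvM rest 0 := pvM_nonneg rest 0 le_rfl
        rw [hM1, max_eq_right hnn] at hM
        have hrl : rest.length ≤ n := by simp only [List.length_cons] at hlen; omega
        obtain ⟨j, hjlen, hall⟩ := ih rest hrl k hk hM
        exact ⟨j + 1, by simp only [List.length_cons]; omega, by simpa using hall⟩

-- B's range-of-windows loop decides pvRun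
theorem B_window (xs : List Int) (p : Int) (hp : 0 < p) :
    ((PySem.List.pyRange 0 (((xs.map (fun x => decide (0 < x))).length : Int) - p + 1) 1).any
      (fun i => (PySem.List.slice (xs.map (fun x => decide (0 < x))) (some i) (some (i + p))).all id) = true)
    ↔ pvRun xs p.toNat := by
  rw [List.any_eq_true]
  constructor
  · rintro ⟨i, hmem, hslice⟩
    rw [PySem.List.mem_pyRange_one] at hmem
    obtain ⟨hi0, hi1⟩ := hmem
    simp only [List.length_map] at hi1
    rw [PySem.List.slice_toNat (xs.map (fun x => decide (0 < x))) hi0 (by omega)] at hslice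
    have hk : (i + p).toNat - i.toNat = p.toNat := by omega
    rw [hk, List.all_eq_true] at hslice
    refine ⟨i.toNat, by omega, ?_⟩
    intro y hy
    have hmt : ((xs.map (fun x => decide (0 < x))).drop i.toNat).take p.toNat
        = ((xs.drop i.toNat).take p.toNat).map (fun x => decide (0 < x)) := by
      simp
    rw [hmt] at hslice
    have := hslice _ (List.mem_map_of_mem hy)
    simpa using this
  · rintro ⟨j, hjlen, hall⟩
    refine ⟨(j : Int), ?_, ?_⟩
    · rw [PySem.List.mem_pyRange_one]
      simp only [List.length_map]
      omega
    · rw [PySem.List.slice_toNat (xs.map (fun x => decide (0 < x))) (by omega) (by omega)]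
      have hmt : ((xs.map (fun x => decide (0 < x))).drop ((j : Int)).toNat).take
            (((j : Int) + p).toNat - ((j : Int)).toNat)
          = ((xs.drop j).take p.toNat).map (fun x => decide (0 < x)) := by
        rw [show ((j : Int)).toNat = j by simp, show ((j : Int) + p).toNat - j = p.toNat by omega]
        simp
      rw [hmt, List.all_eq_true]
      rintro b hb
      obtain ⟨y, hy, rfl⟩ := List.mem_map.mp hb
      simpa using hall y hy

-- ===== VERDICT (by name: the statement is the Claim_ definition above) =====
theorem check_if_at_is_continous_spec : Claim_equal_check_if_at_is_continous := by
  intro at_ p _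
  unfold Spec_check_if_at_is_continous check_if_at_is_continous check_if_at_is_continous_alt
  by_cases hp : p ≤ 0
  · rw [pvLoopA_nonpos at_ 0 p le_rfl hp]
    simp [hp]
  · replace hp : 0 < p := by omega
    simp only [if_neg (by omega : ¬ p ≤ 0)]
    rw [pvLoopA_eq_M at_ 0 p le_rfl hp]
    rw [Bool.eq_iff_iff, decide_eq_true_eq, B_window at_ p hp]
    constructor
    · intro hM
      exact M_to_run at_.length at_ le_rfl p.toNat (by omega)
        (by rw [Int.toNat_of_nonneg (by omega)]; exact hM)
    · intro hrun
      have := run_to_M at_ p.toNat (by omega) hrun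
      rw [Int.toNat_of_nonneg (by omega)] at this
      exact this
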